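-- pv_equiv track=rewrite | github.com/Jannymo13/BashBuddy | BashBuddy/src/bashbuddy/cli/formatting.py | wrap_command
-- ===== SOURCE A (Python) =====
-- def wrap_command(command, width):
--     """
--     Wrap a command intelligently, breaking at spaces or special characters.
--     Continuation lines are indented.
--     """
--     if len(command) <= width - 2:
--         return [f"  {command}"]
--
--     lines = []
--     current_line = "  "
--     indent = "    "  # Indentation for continuation lines
--
--     # Try to break at logical points: spaces, pipes, semicolons
--     tokens = []
--     current_token = ""
--
--     for char in command:
--         current_token += char
--         if char in (' ', '|', ';', '&'):
--             tokens.append(current_token)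
--             current_token = ""
--     if current_token:
--         tokens.append(current_token)
--
--     for token in tokens:
--         # Check if adding this token would exceed width
--         test_line = current_line + token
--
--         if len(test_line) <= width:
--             current_line += token
--         else:
--             # Start a new line
--             if current_line.strip():
--                 lines.append(current_line)
--             current_line = indent + token
--
--     # Add final line
--     if current_line.strip():
--         lines.append(current_line)
--
--     return lines
-- ===== SOURCE B (Python) =====
-- def wrap_command(command, width):
--     """
--     Wrap a command intelligently, breaking at spaces or special characters.
--     Continuation lines are indented.
--
--     B: tokens are cut out of the string by slice at recorded delimiter offsets
--     (no char-by-char token building), then line breaks are chosen by arithmetic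
--     on token lengths alone; each output line is the join of a whole group.
--     """
--     if len(command) <= width - 2:
--         return [f"  {command}"]
--
--     # Tokenize by slicing at the positions just after each delimiter.
--     tokens = []
--     start = 0
--     for i, ch in enumerate(command):
--         if ch in ' |;&':
--             tokens.append(command[start:i + 1])
--             start = i + 1
--     if start < len(command):
--         tokens.append(command[start:])
--
--     # Greedy grouping computed on token lengths; emit joined groups.
--     lines = []
--     n = len(tokens)
--     j = 0
--     total = 2
--     while j < n and total + len(tokens[j]) <= width:
--         total += len(tokens[j])
--         j += 1
--     seg = "".join(tokens[:j])
--     if seg.strip():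
--         lines.append("  " + seg)
--     i = j
--     while i < n:
--         j = i + 1
--         total = 4 + len(tokens[i])
--         while j < n and total + len(tokens[j]) <= width:
--             total += len(tokens[j])
--             j += 1
--         seg = "".join(tokens[i:j])
--         if seg.strip():
--             lines.append("    " + seg)
--         i = j
--     return lines
-- ===== Notes on version B (the rewrite author's own statement) =====
-- stated objective: faster
-- what changed: B tokenizes by slicing the string at recorded delimiter offsets instead of building each token character by character, then chooses line breaks by greedy arithmetic over token lengths alone and emits each line as one join of a whole group instead of growing and flushing a current_line string token by token.
import Mathlib
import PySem

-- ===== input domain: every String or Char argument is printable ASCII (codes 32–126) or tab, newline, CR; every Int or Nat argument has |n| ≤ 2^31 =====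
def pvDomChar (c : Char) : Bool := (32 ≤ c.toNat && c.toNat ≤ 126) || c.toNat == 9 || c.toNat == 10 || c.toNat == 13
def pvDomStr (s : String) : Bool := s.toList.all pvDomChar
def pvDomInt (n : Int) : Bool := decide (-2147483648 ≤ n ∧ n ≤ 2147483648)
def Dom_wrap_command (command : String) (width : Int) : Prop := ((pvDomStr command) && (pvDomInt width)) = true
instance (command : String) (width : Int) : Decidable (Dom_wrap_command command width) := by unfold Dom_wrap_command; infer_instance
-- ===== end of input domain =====

-- B cuts tokens out of the string by slicing at recorded delimiter offsets and picks
-- line breaks by greedy arithmetic over token lengths, joining whole groups into lines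
-- instead of growing/flushing a current_line string token by token (objective: faster by a
-- constant factor, as measured: no per-character string concatenation).

-- ===== PORT A =====
-- first loop of A: build (tokens, current_token) character by character
def wrapTokStep (st : List (List Char) × List Char) (c : Char) :
    List (List Char) × List Char :=
  let cur := st.2 ++ [c]
  if c == ' ' || c == '|' || c == ';' || c == '&' then (st.1 ++ [cur], [])
  else (st.1, cur)

-- second loop of A: greedy packing of one token onto (lines, current_line)
def wrapPackStep (width : Int) (st : List String × List Char) (tok : List Char) :
    List String × List Char :=
  let test := st.2 ++ tok
  if (test.length : Int) ≤ width then (st.1, test)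
  else
    ((if PySem.Chars.strip st.2 ≠ [] then st.1 ++ [String.ofList st.2] else st.1),
     (' ' :: ' ' :: ' ' :: ' ' :: []) ++ tok)

def wrap_command (command : String) (width : Int) : List String :=
  if (command.toList.length : Int) ≤ width - 2 then
    [String.ofList (' ' :: ' ' :: command.toList)]
  else
    let tf := command.toList.foldl wrapTokStep ([], [])
    let tokens := if tf.2 ≠ [] then tf.1 ++ [tf.2] else tf.1
    let pf := tokens.foldl (wrapPackStep width) ([], ' ' :: ' ' :: [])
    if PySem.Chars.strip pf.2 ≠ [] then pf.1 ++ [String.ofList pf.2] else pf.1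

-- ===== PORT B =====
-- B's tokenizer loop: keep only the slice start offset; cut a token out of the
-- string whenever a delimiter is seen (state = (tokens, start))
def wrapTokStepB (s : List Char) (st : List (List Char) × Int) (ic : Int × Char) :
    List (List Char) × Int :=
  if ic.2 == ' ' || ic.2 == '|' || ic.2 == ';' || ic.2 == '&' then
    (st.1 ++ [PySem.List.slice s (some st.2) (some (ic.1 + 1))], ic.1 + 1)
  else st

def wrapTokensB (s : List Char) : List (List Char) :=
  let f := (PySem.List.enumerate s 0).foldl (wrapTokStepB s) ([], 0)
  if f.2 < (s.length : Int) then f.1 ++ [PySem.List.slice s (some f.2) none] else f.1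

-- B's inner while: consume tokens while they fit the running length budget
def wrapConsumeB (width : Int) (total : Int) : List (List Char) → List (List Char) × List (List Char)
  | [] => ([], [])
  | t :: ts =>
    if total + (t.length : Int) ≤ width then
      let p := wrapConsumeB width (total + (t.length : Int)) ts
      (t :: p.1, p.2)
    else ([], t :: ts)

-- needed by wrapPackRestB's termination proof, hence above the port
lemma wrapConsumeB_len (width total : Int) :
    ∀ ts : List (List Char), (wrapConsumeB width total ts).2.length ≤ ts.length := by
  intro ts
  induction ts generalizing total with
  | nil => simp [wrapConsumeB]
  | cons t ts ih =>
    simp only [wrapConsumeB]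
    split
    · exact Nat.le_succ_of_le (ih _)
    · simp

-- "if seg.strip(): lines.append(pre + seg)" as a list
def wrapEmitB (pre seg : List Char) : List String :=
  if PySem.Chars.strip seg = [] then [] else [String.ofList (pre ++ seg)]

-- B's outer while over the remaining tokens: each round takes one token
-- unconditionally, consumes while it fits, and joins the group into one line
def wrapPackRestB (width : Int) : List (List Char) → List String
  | [] => []
  | t :: ts =>
    let p := wrapConsumeB width (4 + (t.length : Int)) ts
    wrapEmitB (' ' :: ' ' :: ' ' :: ' ' :: []) (t ++ p.1.flatten) ++ wrapPackRestB width p.2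
termination_by l => l.length
decreasing_by
  exact Nat.lt_succ_of_le (wrapConsumeB_len _ _ _)

def wrap_command_alt (command : String) (width : Int) : List String :=
  if (command.toList.length : Int) ≤ width - 2 then
    [String.ofList (' ' :: ' ' :: command.toList)]
  else
    let toks := wrapTokensB command.toList
    let p := wrapConsumeB width 2 toks
    wrapEmitB (' ' :: ' ' :: []) p.1.flatten ++ wrapPackRestB width p.2

-- ===== PRECONDITION & SPEC =====
def Spec_wrap_command (command : String) (width : Int) (out : List String) : Prop := out = wrap_command_alt command width
instance (command : String) (width : Int) (out : List String) : Decidable (Spec_wrap_command command width out) := by unfold Spec_wrap_command; infer_instance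

-- ===== CLAIM (what is proved, stated in full; the proofs are below) =====
def Claim_equal_wrap_command : Prop := ∀ (command : String) (width : Int), Dom_wrap_command command width → Spec_wrap_command command width (wrap_command command width)

-- ===== LEMMAS AND PROOFS =====

-- A's flush of a current line, as a list (proof-side helper)
def wrapEmitA (c : List Char) : List String :=
  if PySem.Chars.strip c ≠ [] then [String.ofList c] else []

lemma strip_space_cons (xs : List Char) :
    PySem.Chars.strip (' ' :: xs) = PySem.Chars.strip xs := by
  simp [PySem.Chars.strip, PySem.Chars.lstrip, PySem.Chars.rstrip, PySem.Chars.isspace]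

lemma emitA_two (seg : List Char) :
    wrapEmitA (' ' :: ' ' :: seg) = wrapEmitB (' ' :: ' ' :: []) seg := by
  simp [wrapEmitA, wrapEmitB, strip_space_cons]

-- A's packing fold equals B's consume/group decomposition
lemma packA_eq (width : Int) :
    ∀ (toks : List (List Char)) (L : List String) (C : List Char),
    (if PySem.Chars.strip (toks.foldl (wrapPackStep width) (L, C)).2 ≠ [] then
       (toks.foldl (wrapPackStep width) (L, C)).1 ++
         [String.ofList (toks.foldl (wrapPackStep width) (L, C)).2]
     else (toks.foldl (wrapPackStep width) (L, C)).1)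
    = L ++ wrapEmitA (C ++ (wrapConsumeB width (C.length : Int) toks).1.flatten)
        ++ wrapPackRestB width (wrapConsumeB width (C.length : Int) toks).2 := by
  intro toks
  induction toks with
  | nil =>
    intro L C
    simp [wrapConsumeB, wrapPackRestB, wrapEmitA]
    split <;> simp
  | cons t ts ih =>
    intro L C
    by_cases hfit : (C.length : Int) + (t.length : Int) ≤ width
    · have hstep : wrapPackStep width (L, C) t = (L, C ++ t) := by
        simp only [wrapPackStep]
        rw [if_pos (by push_cast [List.length_append]; omega)]
      have hcons : wrapConsumeB width (C.length : Int) (t :: ts) =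
          ((t :: (wrapConsumeB width ((C.length : Int) + (t.length : Int)) ts).1),
           (wrapConsumeB width ((C.length : Int) + (t.length : Int)) ts).2) := by
        simp [wrapConsumeB, hfit]
      rw [List.foldl_cons, hstep, ih, hcons]
      have hlen : (((C ++ t).length : Int)) = (C.length : Int) + (t.length : Int) := by
        push_cast [List.length_append]; ring
      rw [hlen]
      simp [List.append_assoc]
    · have hstep : wrapPackStep width (L, C) t =
          (L ++ wrapEmitA C, (' ' :: ' ' :: ' ' :: ' ' :: []) ++ t) := by
        simp only [wrapPackStep, wrapEmitA]
        rw [if_neg (by push_cast [List.length_append]; omega)]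
        split <;> simp
      have hcons : wrapConsumeB width (C.length : Int) (t :: ts) = ([], t :: ts) := by
        simp [wrapConsumeB, hfit]
      rw [List.foldl_cons, hstep, ih, hcons]
      have hlen : ((((' ' :: ' ' :: ' ' :: ' ' :: []) ++ t).length : Int)) = 4 + (t.length : Int) := by
        push_cast [List.length_append]; norm_num
      rw [hlen]
      have hrest : wrapPackRestB width (t :: ts) =
          wrapEmitB (' ' :: ' ' :: ' ' :: ' ' :: [])
              (t ++ (wrapConsumeB width (4 + (t.length : Int)) ts).1.flatten)
            ++ wrapPackRestB width (wrapConsumeB width (4 + (t.length : Int)) ts).2 := by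
        rw [wrapPackRestB]
      rw [hrest]
      rw [← List.append_assoc]
      simp [wrapEmitA, wrapEmitB, strip_space_cons]

-- B's offset-slicing tokenizer fold tracks A's accumulating fold: the token lists
-- agree and A's pending token is exactly the suffix of s from B's start offset
lemma tok_gen (s : List Char) :
    ∀ (cs : List Char) (k start : Nat) (acc : List (List Char)),
    start ≤ k → k + cs.length = s.length → s.drop k = cs →
    ∃ start' : Nat,
      (PySem.List.enumerate cs (k : Int)).foldl (wrapTokStepB s) (acc, (start : Int))
        = ((cs.foldl wrapTokStep (acc, (s.drop start).take (k - start))).1, (start' : Int))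
      ∧ start' ≤ s.length
      ∧ (cs.foldl wrapTokStep (acc, (s.drop start).take (k - start))).2 = s.drop start' := by
  intro cs
  induction cs with
  | nil =>
    intro k start acc hsk hlen hdrop
    refine ⟨start, ?_, by omega, ?_⟩
    · simp only [PySem.List.enumerate_nil, List.foldl_nil]
    · simp only [List.foldl_nil]
      have hkl : k = s.length := by simpa using hlen
      have : k - start = (s.drop start).length := by rw [List.length_drop]; omega
      rw [this, List.take_length]
  | cons c cs ih =>
    intro k start acc hsk hlen hdrop
    have hk : k < s.length := by simp at hlen; omega
    have hck : s[k]? = some c := by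
      have h0 : (s.drop k)[0]? = some c := by rw [hdrop]; rfl
      rw [List.getElem?_drop] at h0
      simpa using h0
    have hdrop' : s.drop (k + 1) = cs := by
      rw [← List.drop_drop, hdrop]
      simp
    have hcur : (s.drop start).take (k - start) ++ [c] = (s.drop start).take (k + 1 - start) := by
      have h1 : k + 1 - start = (k - start) + 1 := by omega
      rw [h1, List.take_add_one]
      have : (s.drop start)[k - start]? = some c := by
        rw [List.getElem?_drop]
        have : start + (k - start) = k := by omega
        rw [this, hck]
      rw [this]
      simp
    rw [PySem.List.enumerate_cons, List.foldl_cons, List.foldl_cons]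
    by_cases hdel : (c == ' ' || c == '|' || c == ';' || c == '&') = true
    · have hstepB : wrapTokStepB s (acc, (start : Int)) ((k : Int), c) =
          (acc ++ [PySem.List.slice s (some (start : Int)) (some ((k : Int) + 1))], (k : Int) + 1) := by
        simp [wrapTokStepB, hdel]
      have hslice : PySem.List.slice s (some (start : Int)) (some ((k : Int) + 1)) =
          (s.drop start).take (k + 1 - start) := by
        have : ((k : Int) + 1) = ((k + 1 : Nat) : Int) := by push_cast; ring
        rw [this, PySem.List.slice_natCast]
      have hstepA : wrapTokStep (acc, (s.drop start).take (k - start)) c =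
          (acc ++ [(s.drop start).take (k + 1 - start)], []) := by
        simp only [wrapTokStep, hdel, if_pos]
        rw [hcur]
      rw [hstepB, hslice, hstepA]
      have hcast : ((k : Int) + 1) = ((k + 1 : Nat) : Int) := by push_cast; ring
      rw [hcast]
      obtain ⟨st', h1, h2, h3⟩ := ih (k + 1) (k + 1) (acc ++ [(s.drop start).take (k + 1 - start)])
        (le_refl _) (by simp at hlen ⊢; omega) hdrop'
      simp only [Nat.sub_self, List.take_zero] at h1 h3
      exact ⟨st', h1, h2, h3⟩
    · have hstepB : wrapTokStepB s (acc, (start : Int)) ((k : Int), c) = (acc, (start : Int)) := by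
        simp [wrapTokStepB, hdel]
      have hstepA : wrapTokStep (acc, (s.drop start).take (k - start)) c =
          (acc, (s.drop start).take (k + 1 - start)) := by
        simp only [wrapTokStep, hdel, if_neg, Bool.not_eq_true]
        rw [hcur]
      rw [hstepB, hstepA]
      have hcast : ((k : Int) + 1) = ((k + 1 : Nat) : Int) := by push_cast; ring
      rw [hcast]
      exact ih (k + 1) start acc (by omega) (by simp at hlen ⊢; omega) hdrop'

-- B's slicing tokenizer equals A's accumulating tokenizer
lemma tokensB_eq (s : List Char) :
    wrapTokensB s =
      (if (s.foldl wrapTokStep ([], [])).2 ≠ [] then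
        (s.foldl wrapTokStep ([], [])).1 ++ [(s.foldl wrapTokStep ([], [])).2]
      else (s.foldl wrapTokStep ([], [])).1) := by
  obtain ⟨st', h1, h2, h3⟩ := tok_gen s s 0 0 [] (le_refl 0) (by simp) (by simp)
  simp only [List.drop_zero, Nat.sub_zero, List.take_zero] at h1 h3
  unfold wrapTokensB
  have h0 : ((0 : Nat) : Int) = (0 : Int) := rfl
  rw [← h0, h1]
  simp only []
  have hcond : ((st' : Int) < (s.length : Int)) ↔ (s.foldl wrapTokStep ([], [])).2 ≠ [] := by
    rw [h3]
    constructor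
    · intro h
      have : st' < s.length := by exact_mod_cast h
      simp [List.drop_eq_nil_iff]
      omega
    · intro h
      have : ¬ s.length ≤ st' := fun hle => h (by simp [List.drop_eq_nil_iff]; omega)
      exact_mod_cast by omega
  by_cases hc : (s.foldl wrapTokStep ([], [])).2 ≠ []
  · rw [if_pos (hcond.mpr hc), if_pos hc]
    congr 1
    rw [PySem.List.slice_from_natCast, h3]
  · rw [if_neg (fun h => hc (hcond.mp h)), if_neg hc]

-- ===== VERDICT (by name: the statement is the Claim_ definition above) =====
theorem wrap_command_spec : Claim_equal_wrap_command := by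
  intro command width _
  show wrap_command command width = wrap_command_alt command width
  unfold wrap_command wrap_command_alt
  by_cases hw : (command.toList.length : Int) ≤ width - 2
  · rw [if_pos hw, if_pos hw]
  · rw [if_neg hw, if_neg hw]
    simp only [tokensB_eq]
    rw [packA_eq width _ [] (' ' :: ' ' :: [])]
    simp [emitA_two]
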